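-- pv_equiv track=rewrite | github.com/KaraZajac/KAT | scripts/analyze_sub_vag.py | scan_vag_preamble_with_tolerances
-- ===== SOURCE A (Python) =====
-- TE_SHORT_12 = 300   # Type 1/2 short
--
-- TE_SHORT = 500      # Type 3/4 short
--
-- def scan_vag_preamble_with_tolerances(pairs: list[tuple[bool, int]], invert: bool) -> list[str]:
--     """
--     Scan entire file for HIGH pulses that could be VAG preamble (300 or 500 µs)
--     with multiple tolerances. Reports counts and first few indices for each.
--     """
--     lines: list[str] = []
--     # Tolerances to try: current (79), then relaxed
--     tolerances = [79, 100, 120, 150, 200]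
--     for tol in tolerances:
--         indices_300: list[int] = []
--         indices_500: list[int] = []
--         for i, (level, duration) in enumerate(pairs):
--             if invert:
--                 level = not level
--             if not level:
--                 continue
--             if TE_SHORT_12 - tol <= duration <= TE_SHORT_12 + tol:
--                 indices_300.append(i)
--             if TE_SHORT - tol <= duration <= TE_SHORT + tol:
--                 indices_500.append(i)
--         lines.append(f"  Tolerance ±{tol} µs:  {len(indices_300)} pulses near 300 µs, {len(indices_500)} near 500 µs")
--         if indices_300:
--             first_few = indices_300[:5]
--             lines.append(f"    First 300±{tol} at indices: {first_few}")
--         if indices_500: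
--             first_few = indices_500[:5]
--             lines.append(f"    First 500±{tol} at indices: {first_few}")
--     return lines
-- ===== SOURCE B (Python) =====
-- TE_SHORT_12 = 300
-- TE_SHORT = 500
--
-- def scan_vag_preamble_with_tolerances(pairs: list[tuple[bool, int]], invert: bool) -> list[str]:
--     # One pass over pairs: keep, for each HIGH pulse (after invert), its index
--     # and its distances to 300 and 500; then each tolerance is a filter of that list.
--     recs = [(i, abs(d - TE_SHORT_12), abs(d - TE_SHORT))
--             for i, (level, d) in enumerate(pairs) if level != invert]
--     lines: list[str] = []
--     for tol in (79, 100, 120, 150, 200):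
--         idx300 = [i for i, d3, _ in recs if d3 <= tol]
--         idx500 = [i for i, _, d5 in recs if d5 <= tol]
--         lines.append(f"  Tolerance ±{tol} µs:  {len(idx300)} pulses near 300 µs, {len(idx500)} near 500 µs")
--         if idx300:
--             lines.append(f"    First 300±{tol} at indices: {idx300[:5]}")
--         if idx500:
--             lines.append(f"    First 500±{tol} at indices: {idx500[:5]}")
--     return lines
-- ===== Notes on version B (the rewrite author's own statement) =====
-- stated objective: alternative
-- what changed: B makes a single pass over pairs computing for each HIGH pulse its index and distances to 300/500, then each tolerance becomes a simple filter of that precomputed list, instead of A re-scanning all pairs and re-testing level/invert and both interval bounds for every tolerance.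
import Mathlib
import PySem

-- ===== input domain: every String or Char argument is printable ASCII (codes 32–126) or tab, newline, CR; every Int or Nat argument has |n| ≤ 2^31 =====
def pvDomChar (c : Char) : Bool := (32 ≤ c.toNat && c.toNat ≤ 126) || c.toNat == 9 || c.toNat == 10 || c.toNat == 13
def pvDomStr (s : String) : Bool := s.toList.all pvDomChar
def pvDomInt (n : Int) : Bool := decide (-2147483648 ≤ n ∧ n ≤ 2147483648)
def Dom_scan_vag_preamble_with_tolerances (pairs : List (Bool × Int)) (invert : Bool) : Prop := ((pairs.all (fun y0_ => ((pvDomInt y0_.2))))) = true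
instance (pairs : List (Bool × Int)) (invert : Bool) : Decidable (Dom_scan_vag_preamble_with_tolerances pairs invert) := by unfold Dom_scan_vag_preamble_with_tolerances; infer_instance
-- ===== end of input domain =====

-- B re-decomposes A: one pass collecting (index, |d-300|, |d-500|) for HIGH pulses, then each
-- tolerance is a mere filter of that list; same return value (objective: alternative decomposition).

-- shared f-string formatting helpers (both Pythons emit identical format strings)
def pvFmtIdx (xs : List Int) : String :=
  "[" ++ PySem.Str.join ", " (xs.map PySem.Int.toStr) ++ "]"

def pvFmtCount (tol : Int) (n3 n5 : Int) : String :=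
  "  Tolerance ±" ++ PySem.Int.toStr tol ++ " µs:  " ++ PySem.Int.toStr n3 ++
    " pulses near 300 µs, " ++ PySem.Int.toStr n5 ++ " near 500 µs"

def pvFmtFirst (which tol : Int) (xs : List Int) : String :=
  "    First " ++ PySem.Int.toStr which ++ "±" ++ PySem.Int.toStr tol ++
    " at indices: " ++ pvFmtIdx xs

-- ===== PORT A =====
-- body of A's inner 'for i, (level, duration) in enumerate(pairs)' loop
def pvAStep (invert : Bool) (tol : Int) (acc : List Int × List Int)
    (ip : Int × Bool × Int) : List Int × List Int :=
  let level := if invert then !ip.2.1 else ip.2.1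
  if !level then acc
  else
    let a1 := if 300 - tol ≤ ip.2.2 ∧ ip.2.2 ≤ 300 + tol then acc.1 ++ [ip.1] else acc.1
    let a2 := if 500 - tol ≤ ip.2.2 ∧ ip.2.2 ≤ 500 + tol then acc.2 ++ [ip.1] else acc.2
    (a1, a2)

-- body of A's outer 'for tol in tolerances' loop
def pvATol (pairs : List (Bool × Int)) (invert : Bool) (tol : Int) (lines : List String) : List String :=
  let p := (PySem.List.enumerate pairs).foldl (pvAStep invert tol) ([], [])
  let lines := lines ++ [pvFmtCount tol p.1.length p.2.length]
  let lines := if p.1 ≠ [] then lines ++ [pvFmtFirst 300 tol (PySem.List.slice p.1 none (some 5))] else lines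
  if p.2 ≠ [] then lines ++ [pvFmtFirst 500 tol (PySem.List.slice p.2 none (some 5))] else lines

def scan_vag_preamble_with_tolerances (pairs : List (Bool × Int)) (invert : Bool) : List String :=
  ([79, 100, 120, 150, 200] : List Int).foldl (fun lines tol => pvATol pairs invert tol lines) []

-- ===== PORT B =====
-- single pass: (original index, |d-300|, |d-500|) for each pulse that is HIGH after invert
def pvBRecs (pairs : List (Bool × Int)) (invert : Bool) : List (Int × Int × Int) :=
  (PySem.List.enumerate pairs).filterMap
    (fun ip => if ip.2.1 ≠ invert then some (ip.1, |ip.2.2 - 300|, |ip.2.2 - 500|) else none)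

-- the lines one tolerance contributes, from the precomputed records
def pvBLines (recs : List (Int × Int × Int)) (tol : Int) : List String :=
  let idx300 := (recs.filter (fun r => r.2.1 ≤ tol)).map (·.1)
  let idx500 := (recs.filter (fun r => r.2.2 ≤ tol)).map (·.1)
  [pvFmtCount tol idx300.length idx500.length] ++
    (if idx300 = [] then [] else [pvFmtFirst 300 tol (PySem.List.slice idx300 none (some 5))]) ++
    (if idx500 = [] then [] else [pvFmtFirst 500 tol (PySem.List.slice idx500 none (some 5))])

def scan_vag_preamble_with_tolerances_alt (pairs : List (Bool × Int)) (invert : Bool) : List String :=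
  let recs := pvBRecs pairs invert
  ([79, 100, 120, 150, 200] : List Int).flatMap (pvBLines recs)

-- ===== PRECONDITION & SPEC =====
def Spec_scan_vag_preamble_with_tolerances (pairs : List (Bool × Int)) (invert : Bool) (out : List String) : Prop := out = scan_vag_preamble_with_tolerances_alt pairs invert
instance (pairs : List (Bool × Int)) (invert : Bool) (out : List String) : Decidable (Spec_scan_vag_preamble_with_tolerances pairs invert out) := by unfold Spec_scan_vag_preamble_with_tolerances; infer_instance

-- ===== CLAIM (what is proved, stated in full; the proofs are below) =====
def Claim_equal_scan_vag_preamble_with_tolerances : Prop := ∀ (pairs : List (Bool × Int)) (invert : Bool), Dom_scan_vag_preamble_with_tolerances pairs invert → Spec_scan_vag_preamble_with_tolerances pairs invert (scan_vag_preamble_with_tolerances pairs invert)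

-- ===== LEMMAS AND PROOFS =====

-- A's inner loop over any enumerated list equals the two filters of B's record list
theorem pvAStep_foldl (invert : Bool) (tol : Int) (L : List (Int × Bool × Int)) :
    ∀ acc : List Int × List Int,
      L.foldl (pvAStep invert tol) acc =
        (acc.1 ++ ((L.filterMap (fun ip => if ip.2.1 ≠ invert then some (ip.1, |ip.2.2 - 300|, |ip.2.2 - 500|) else none)).filter
              (fun r => r.2.1 ≤ tol)).map (·.1),
         acc.2 ++ ((L.filterMap (fun ip => if ip.2.1 ≠ invert then some (ip.1, |ip.2.2 - 300|, |ip.2.2 - 500|) else none)).filter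
              (fun r => r.2.2 ≤ tol)).map (·.1)) := by
  induction L with
  | nil => intro acc; simp
  | cons hd tl ih =>
    intro acc
    obtain ⟨i, b, d⟩ := hd
    simp only [List.foldl_cons, ih]
    by_cases hlev : b = invert
    · cases invert <;> cases b <;> simp_all [pvAStep]
    · have h3 : (|d - 300| ≤ tol) ↔ (300 - tol ≤ d ∧ d ≤ 300 + tol) := by
        rw [abs_le]; constructor <;> intro h <;> omega
      have h5 : (|d - 500| ≤ tol) ↔ (500 - tol ≤ d ∧ d ≤ 500 + tol) := by
        rw [abs_le]; constructor <;> intro h <;> omega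
      by_cases c3 : 300 - tol ≤ d ∧ d ≤ 300 + tol <;>
        by_cases c5 : 500 - tol ≤ d ∧ d ≤ 500 + tol <;>
          cases invert <;> cases b <;> simp_all [pvAStep]

theorem pvATol_eq (pairs : List (Bool × Int)) (invert : Bool) (tol : Int)
    (lines : List String) :
    pvATol pairs invert tol lines = lines ++ pvBLines (pvBRecs pairs invert) tol := by
  unfold pvATol
  simp only [pvAStep_foldl invert tol (PySem.List.enumerate pairs) ([], []), pvBRecs, pvBLines,
    List.nil_append]
  set f3 := (((PySem.List.enumerate pairs).filterMap
      (fun ip => if ip.2.1 ≠ invert then some (ip.1, |ip.2.2 - 300|, |ip.2.2 - 500|) else none)).filter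
      (fun r => r.2.1 ≤ tol)).map (·.1) with hf3
  set f5 := (((PySem.List.enumerate pairs).filterMap
      (fun ip => if ip.2.1 ≠ invert then some (ip.1, |ip.2.2 - 300|, |ip.2.2 - 500|) else none)).filter
      (fun r => r.2.2 ≤ tol)).map (·.1) with hf5
  by_cases h3 : f3 = [] <;> by_cases h5 : f5 = [] <;>
    simp [h3, h5, List.append_assoc]

-- ===== VERDICT (by name: the statement is the Claim_ definition above) =====
theorem scan_vag_preamble_with_tolerances_spec : Claim_equal_scan_vag_preamble_with_tolerances := by
  intro pairs invert _
  unfold Spec_scan_vag_preamble_with_tolerances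
  unfold scan_vag_preamble_with_tolerances scan_vag_preamble_with_tolerances_alt
  have hf : (fun (lines : List String) (tol : Int) => pvATol pairs invert tol lines)
      = fun lines tol => lines ++ pvBLines (pvBRecs pairs invert) tol := by
    funext lines tol; exact pvATol_eq pairs invert tol lines
  rw [hf, PySem.List.foldl_append_eq_flatMap, List.nil_append]
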